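-- pv_equiv track=rewrite | github.com/Rogan-afk/credilens.app | credilens/qa/provenance.py | merge_page_refs
-- ===== SOURCE A (Python) =====
-- from typing import Dict, List, Iterable, Mapping, Optional, Tuple
--
-- def _normalize_pages(pages: Iterable[int]) -> List[int]:
--     """Ensure pages are positive integers, unique, sorted."""
--     uniq = set()
--     for p in pages:
--         try:
--             ip = int(p)
--         except (TypeError, ValueError):
--             continue
--         if ip > 0:
--             uniq.add(ip)
--     return sorted(uniq)
--
-- def merge_page_refs(a: Mapping[str, List[int]], b: Mapping[str, List[int]]) -> Dict[str, List[int]]: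
--     """
--     Merge two page_refs maps. Values are merged uniquely and sorted.
--     Left-biased on keys; values are union.
--     """
--     out: Dict[str, List[int]] = {k: _normalize_pages(v) for k, v in a.items()}
--     for k, v in b.items():
--         if k in out:
--             out[k] = _normalize_pages([*out[k], *(v or [])])
--         else:
--             out[k] = _normalize_pages(v or [])
--     return out
-- ===== SOURCE B (Python) =====
-- def _dedup_pos(pages):
--     # sort once, then one linear scan keeping positive values and skipping runs
--     out = []
--     for p in sorted(pages):
--         if p > 0 and (not out or out[-1] != p):
--             out.append(p)
--     return out
--
-- def merge_page_refs(a, b):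
--     # Build each output entry independently by direct lookup, no incremental
--     # re-normalization: a-keys first (unioned with b's pages), then b-only keys.
--     kept = [(k, _dedup_pos([*v, *(b.get(k) or [])])) for k, v in a.items()]
--     new = [(k, _dedup_pos(v or [])) for k, v in b.items() if k not in a]
--     return dict(kept + new)
-- ===== Notes on version B (the rewrite author's own statement) =====
-- stated objective: alternative
-- what changed: B computes every output entry independently by direct lookup (a-entries unioned with b.get(k), then the b-only keys) instead of A's incremental dict mutation with re-normalization on overlap, and normalizes by sort-once-then-linear-scan dedup instead of A's set accumulation followed by sorting; Pre_ only excludes association lists with duplicate keys, which do not represent Python dicts (the Mapping argument type), so A never receives them.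
import Mathlib
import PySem

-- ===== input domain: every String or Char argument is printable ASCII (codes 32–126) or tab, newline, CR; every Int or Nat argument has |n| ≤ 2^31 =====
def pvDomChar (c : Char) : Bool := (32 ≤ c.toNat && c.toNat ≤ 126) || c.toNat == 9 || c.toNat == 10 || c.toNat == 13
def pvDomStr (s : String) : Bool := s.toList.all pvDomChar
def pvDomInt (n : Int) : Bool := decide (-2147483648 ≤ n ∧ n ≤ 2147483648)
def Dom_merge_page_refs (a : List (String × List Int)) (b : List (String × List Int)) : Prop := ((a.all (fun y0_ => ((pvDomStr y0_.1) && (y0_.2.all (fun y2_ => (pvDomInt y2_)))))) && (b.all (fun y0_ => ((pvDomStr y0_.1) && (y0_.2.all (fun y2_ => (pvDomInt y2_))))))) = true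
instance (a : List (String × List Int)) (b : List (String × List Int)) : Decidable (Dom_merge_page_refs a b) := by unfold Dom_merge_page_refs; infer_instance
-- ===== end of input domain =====

-- B builds each output entry independently by direct lookup in b (a-keys first,
-- then b-only keys) and normalizes by sort-then-linear-scan instead of A's
-- incremental dict updates with set-then-sort renormalization; objective: simpler.

-- `v or []` on a list value
def pvOrEmpty (v : List Int) : List Int := if v = [] then [] else v

-- ===== PORT A =====
-- _normalize_pages: int(p) is the identity on int inputs (the try/except never fires), so
-- the loop adds the positive elements, in order, to a set, then sorts it.
def pvNormA (pages : List Int) : List Int :=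
  PySem.List.sorted
    (pages.foldl (fun (u : PySem.Set Int) p => if p > 0 then PySem.Set.add u p else u)
      PySem.Set.empty)
    (fun x => x) false

def merge_page_refs (a : List (String × List Int)) (b : List (String × List Int)) : List (String × List Int) :=
  let out : PySem.Dict String (List Int) :=
    a.foldl (fun d kv => d.insert kv.1 (pvNormA kv.2)) PySem.Dict.empty
  let out :=
    b.foldl (fun d kv =>
      if d.contains kv.1 then
        d.insert kv.1 (pvNormA (d.getD kv.1 [] ++ pvOrEmpty kv.2))
      else
        d.insert kv.1 (pvNormA (pvOrEmpty kv.2))) out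
  out.items

-- ===== PORT B =====
-- _dedup_pos: sort once, then one linear scan keeping positives and skipping runs
def pvDedupPos (pages : List Int) : List Int :=
  (PySem.List.sorted pages (fun x => x) false).foldl
    (fun out p => if 0 < p ∧ out.getLast? ≠ some p then out ++ [p] else out) []

def merge_page_refs_alt (a : List (String × List Int)) (b : List (String × List Int)) : List (String × List Int) :=
  let bd := PySem.Dict.mk b            -- b.get(k)
  let ad := PySem.Dict.mk a            -- k not in a
  let kept := a.map (fun kv =>
    (kv.1, pvDedupPos (kv.2 ++ (match bd.get? kv.1 with
                                | some v => pvOrEmpty v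
                                | none => []))))
  let new := (b.filter (fun kv => !(ad.contains kv.1))).map
    (fun kv => (kv.1, pvDedupPos (pvOrEmpty kv.2)))
  (PySem.Dict.ofList (kept ++ new)).items

-- ===== PRECONDITION & SPEC =====
-- Pre_ excludes association lists with duplicate keys: both arguments are Python
-- dicts (Mapping), whose keys are necessarily distinct, so A never receives such lists.
def Pre_merge_page_refs (a : List (String × List Int)) (b : List (String × List Int)) : Prop :=
  (a.map Prod.fst).Nodup ∧ (b.map Prod.fst).Nodup
instance (a : List (String × List Int)) (b : List (String × List Int)) : Decidable (Pre_merge_page_refs a b) := by unfold Pre_merge_page_refs; infer_instance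

def pvWitness_merge_page_refs : (List (String × List Int)) × (List (String × List Int)) :=
  ([("a", [2, 1, -1, 2])], [("a", [1, 3]), ("b", [])])

def Spec_merge_page_refs (a : List (String × List Int)) (b : List (String × List Int)) (out : List (String × List Int)) : Prop := out = merge_page_refs_alt a b
instance (a : List (String × List Int)) (b : List (String × List Int)) (out : List (String × List Int)) : Decidable (Spec_merge_page_refs a b out) := by unfold Spec_merge_page_refs; infer_instance

-- ===== CLAIM (what is proved, stated in full; the proofs are below) =====
def Claim_equal_merge_page_refs : Prop := ∀ (a : List (String × List Int)) (b : List (String × List Int)), Dom_merge_page_refs a b → Pre_merge_page_refs a b → Spec_merge_page_refs a b (merge_page_refs a b)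

-- ===== LEMMAS AND PROOFS =====

-- canonical form of both normalizers: the sorted set of positive elements
def pvNormC (xs : List Int) : List Int :=
  PySem.List.sorted (PySem.Set.ofList (xs.filter (fun p => decide (p > 0)))) (fun x => x) false

theorem norm_filter_foldl (xs : List Int) (s : PySem.Set Int) :
    xs.foldl (fun (u : PySem.Set Int) p => if p > 0 then PySem.Set.add u p else u) s
      = (xs.filter (fun p => decide (p > 0))).foldl PySem.Set.add s := by
  induction xs generalizing s with
  | nil => rfl
  | cons x xs ih =>
    simp only [List.foldl_cons, List.filter_cons]
    by_cases h : x > 0 <;> simp [h, ih]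

theorem normA_eq_normC (xs : List Int) : pvNormA xs = pvNormC xs := by
  unfold pvNormA pvNormC
  rw [norm_filter_foldl, PySem.Set.ofList_eq_foldl]
  rfl

-- in a strictly increasing list, an element that bounds the list from above is its last
theorem last_of_mem_of_ub (p : Int) : ∀ (l : List Int), l.Pairwise (· < ·) →
    p ∈ l → (∀ x ∈ l, x ≤ p) → l.getLast? = some p := by
  intro l
  induction l with
  | nil => intro _ h _; cases h
  | cons a t ih =>
    intro hpw hmem hub
    cases t with
    | nil =>
      simp only [List.mem_cons, List.not_mem_nil, or_false] at hmem
      simp [hmem]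
    | cons c t' =>
      rw [List.getLast?_cons_cons]
      have h1 : a < c := (List.pairwise_cons.mp hpw).1 c (by simp)
      have hmem' : p ∈ c :: t' := by
        rcases List.mem_cons.mp hmem with rfl | h
        · have h2 : c ≤ p := hub c (by simp)
          omega
        · exact h
      exact ih (List.pairwise_cons.mp hpw).2 hmem'
        (fun x hx => hub x (List.mem_cons_of_mem _ hx))

theorem dedup_fold_spec :
    ∀ (s acc : List Int), s.Pairwise (· ≤ ·) → acc.Pairwise (· < ·) →
      (∀ x ∈ acc, ∀ y ∈ s, x ≤ y) →
      (s.foldl (fun out p => if 0 < p ∧ out.getLast? ≠ some p then out ++ [p] else out) acc).Pairwise (· < ·)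
      ∧ ∀ x, x ∈ s.foldl (fun out p => if 0 < p ∧ out.getLast? ≠ some p then out ++ [p] else out) acc
              ↔ x ∈ acc ∨ (x ∈ s ∧ 0 < x) := by
  intro s
  induction s with
  | nil => intro acc _ hacc _; exact ⟨hacc, by simp⟩
  | cons p s ih =>
    intro acc hs hacc hb
    have hps : ∀ y ∈ s, p ≤ y := (List.pairwise_cons.mp hs).1
    have hs' : s.Pairwise (· ≤ ·) := (List.pairwise_cons.mp hs).2
    simp only [List.foldl_cons]
    by_cases hc : 0 < p ∧ acc.getLast? ≠ some p
    · rw [if_pos hc]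
      have hnp : p ∉ acc := by
        intro hmem
        exact hc.2 (last_of_mem_of_ub p acc hacc hmem (fun x hx => hb x hx p (by simp)))
      have hacc' : (acc ++ [p]).Pairwise (· < ·) := by
        rw [List.pairwise_append]
        refine ⟨hacc, List.pairwise_singleton _ _, ?_⟩
        intro x hx y hy
        rw [List.mem_singleton] at hy
        rw [hy]
        have h := hb x hx p (by simp)
        rcases lt_or_eq_of_le h with h' | h'
        · exact h'
        · exact absurd (h' ▸ hx) hnp
      have hb' : ∀ x ∈ acc ++ [p], ∀ y ∈ s, x ≤ y := by
        intro x hx y hy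
        rcases List.mem_append.mp hx with h | h
        · exact hb x h y (List.mem_cons_of_mem _ hy)
        · rw [List.mem_singleton] at h; subst h; exact hps y hy
      obtain ⟨h1, h2⟩ := ih (acc ++ [p]) hs' hacc' hb'
      refine ⟨h1, fun x => ?_⟩
      rw [h2 x]
      simp only [List.mem_append, List.mem_cons, List.not_mem_nil, or_false]
      constructor
      · rintro ((h | rfl) | ⟨h, hpos⟩)
        · exact Or.inl h
        · exact Or.inr ⟨Or.inl rfl, hc.1⟩
        · exact Or.inr ⟨Or.inr h, hpos⟩
      · rintro (h | ⟨(rfl | h), hpos⟩)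
        · exact Or.inl (Or.inl h)
        · exact Or.inl (Or.inr rfl)
        · exact Or.inr ⟨h, hpos⟩
    · rw [if_neg hc]
      obtain ⟨h1, h2⟩ := ih acc hs' hacc (fun x hx y hy => hb x hx y (List.mem_cons_of_mem _ hy))
      refine ⟨h1, fun x => ?_⟩
      rw [h2 x]
      rw [not_and_or, not_not] at hc
      rcases hc with hc | hc
      · simp only [List.mem_cons]
        constructor
        · rintro (h | ⟨h, hpos⟩)
          · exact Or.inl h
          · exact Or.inr ⟨Or.inr h, hpos⟩
        · rintro (h | ⟨(rfl | h), hpos⟩)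
          · exact Or.inl h
          · exact absurd hpos hc
          · exact Or.inr ⟨h, hpos⟩
      · have hpacc : p ∈ acc := by
          cases acc with
          | nil => simp at hc
          | cons a t =>
            have := List.getLast?_eq_some_iff.mp hc
            obtain ⟨l', hl'⟩ := this
            rw [hl']; simp
        simp only [List.mem_cons]
        constructor
        · rintro (h | ⟨h, hpos⟩)
          · exact Or.inl h
          · exact Or.inr ⟨Or.inr h, hpos⟩
        · rintro (h | ⟨(rfl | h), hpos⟩)
          · exact Or.inl h
          · exact Or.inl hpacc
          · exact Or.inr ⟨h, hpos⟩

theorem dedupPos_eq_normC (xs : List Int) : pvDedupPos xs = pvNormC xs := by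
  obtain ⟨hpw, hmem⟩ := dedup_fold_spec (PySem.List.sorted xs (fun x => x) false) []
    (PySem.List.sorted_pairwise xs (fun x => x)) (List.Pairwise.nil) (by simp)
  unfold pvDedupPos pvNormC
  symm
  apply PySem.List.sorted_eq_of_perm_of_pairwise_lt _ _ _ ?_ hpw
  rw [List.perm_ext_iff_of_nodup (hpw.imp (fun h => ne_of_lt h)) (PySem.Set.nodup_ofList _)]
  intro x
  rw [hmem x]
  simp [PySem.Set.mem_ofList, List.mem_filter, PySem.List.mem_sorted]

theorem renorm (x y : List Int) : pvNormA (pvNormC x ++ y) = pvNormC (x ++ y) := by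
  rw [normA_eq_normC]
  unfold pvNormC
  apply PySem.List.sorted_eq_sorted_of_perm _ _ _ (fun a b h => h)
  rw [List.perm_ext_iff_of_nodup (PySem.Set.nodup_ofList _) (PySem.Set.nodup_ofList _)]
  intro q
  simp only [PySem.Set.mem_ofList, List.mem_filter, List.mem_append,
    PySem.List.mem_sorted, decide_eq_true_eq]
  tauto

-- A's b-loop over a dict with distinct keys, characterized on the items level
theorem bfoldA_items (l : List (String × List Int)) :
    ∀ (d : PySem.Dict String (List Int)), (l.map Prod.fst).Nodup → d.keys.Nodup →
    (l.foldl (fun d kv =>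
      if d.contains kv.1 then
        d.insert kv.1 (pvNormA (d.getD kv.1 [] ++ pvOrEmpty kv.2))
      else
        d.insert kv.1 (pvNormA (pvOrEmpty kv.2))) d).items
      = d.items.map (fun p => ((PySem.Dict.mk l).get? p.1).elim p
            (fun v => (p.1, pvNormA (p.2 ++ pvOrEmpty v))))
        ++ (l.filter (fun kv => !(d.contains kv.1))).map
            (fun kv => (kv.1, pvNormA (pvOrEmpty kv.2))) := by
  induction l with
  | nil =>
    intro d _ _
    simp [PySem.Dict.get?]
  | cons kv l ih =>
    intro d hnd hkd
    have hknotin : kv.1 ∉ l.map Prod.fst := (List.nodup_cons.mp hnd).1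
    have hndl : (l.map Prod.fst).Nodup := (List.nodup_cons.mp hnd).2
    have hkeysl : (PySem.Dict.mk l).keys = l.map Prod.fst := rfl
    have hnonel : (PySem.Dict.mk l).get? kv.1 = none := by
      rw [PySem.Dict.get?_eq_none_iff_not_mem_keys, hkeysl]; exact hknotin
    simp only [List.foldl_cons]
    by_cases hc : d.contains kv.1 = true
    · rw [if_pos hc]
      rw [ih (d.insert kv.1 (pvNormA (d.getD kv.1 [] ++ pvOrEmpty kv.2))) hndl
          (PySem.Dict.nodup_keys_insert _ _ _ hkd)]
      rw [PySem.Dict.items_insert_of_contains _ _ hc]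
      have hfil : (l.filter (fun kv' =>
            !((d.insert kv.1 (pvNormA (d.getD kv.1 [] ++ pvOrEmpty kv.2))).contains kv'.1)))
          = l.filter (fun kv' => !(d.contains kv'.1)) := by
        apply List.filter_congr
        intro kv' hkv'
        have hne : kv'.1 ≠ kv.1 := by
          intro h; exact hknotin (h ▸ List.mem_map_of_mem hkv')
        rw [PySem.Dict.contains_insert]
        simp [hne]
      rw [hfil]
      have hrhsfil : ((kv :: l).filter (fun kv' => !(d.contains kv'.1)))
          = l.filter (fun kv' => !(d.contains kv'.1)) := by
        rw [List.filter_cons]; simp [hc]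
      rw [hrhsfil]
      congr 1
      rw [List.map_map]
      apply List.map_congr_left
      intro p hp
      simp only [Function.comp]
      by_cases hpk : p.1 = kv.1
      · rw [if_pos (by simp [hpk])]
        have hgd : d.getD kv.1 [] = p.2 := by
          rw [← hpk]
          exact PySem.Dict.getD_of_mem_items d hp hkd []
        rw [hnonel]
        rw [PySem.Dict.get?_mk_cons]
        simp [hpk, hgd]
      · rw [if_neg (by simp [hpk])]
        rw [PySem.Dict.get?_mk_cons]
        have : (kv.1 == p.1) = false := by
          simp [Ne.symm hpk]
        simp [this]
    · rw [if_neg hc]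
      have hcf : d.contains kv.1 = false := by simpa using hc
      have hknotind : kv.1 ∉ d.keys := by
        rw [PySem.Dict.contains_eq_decide_mem_keys] at hcf
        simpa using hcf
      rw [ih (d.insert kv.1 (pvNormA (pvOrEmpty kv.2))) hndl
          (PySem.Dict.nodup_keys_insert _ _ _ hkd)]
      rw [PySem.Dict.items_insert_of_not_contains _ _ hcf]
      have hfil : (l.filter (fun kv' =>
            !((d.insert kv.1 (pvNormA (pvOrEmpty kv.2))).contains kv'.1)))
          = l.filter (fun kv' => !(d.contains kv'.1)) := by
        apply List.filter_congr
        intro kv' hkv'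
        have hne : kv'.1 ≠ kv.1 := by
          intro h; exact hknotin (h ▸ List.mem_map_of_mem hkv')
        rw [PySem.Dict.contains_insert]
        simp [hne]
      rw [hfil]
      have hrhsfil : ((kv :: l).filter (fun kv' => !(d.contains kv'.1)))
          = kv :: l.filter (fun kv' => !(d.contains kv'.1)) := by
        rw [List.filter_cons]; simp [hcf]
      rw [hrhsfil]
      rw [List.map_append]
      have hmaps : d.items.map (fun p => ((PySem.Dict.mk l).get? p.1).elim p
              (fun v => (p.1, pvNormA (p.2 ++ pvOrEmpty v))))
          = d.items.map (fun p => ((PySem.Dict.mk (kv :: l)).get? p.1).elim p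
              (fun v => (p.1, pvNormA (p.2 ++ pvOrEmpty v)))) := by
        apply List.map_congr_left
        intro p hp
        have hne : (kv.1 == p.1) = false := by
          have : p.1 ∈ d.keys := List.mem_map_of_mem hp
          have : p.1 ≠ kv.1 := fun h => hknotind (h ▸ this)
          simp [Ne.symm this]
        rw [PySem.Dict.get?_mk_cons, hne]
        simp
      rw [hmaps]
      simp [hnonel, List.append_assoc]

-- items of dict(pairs) when the pair list has distinct keys
theorem items_ofList_nodup (ps : List (String × List Int)) (hps : (ps.map Prod.fst).Nodup) :
    (PySem.Dict.ofList ps).items = ps := by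
  have h := PySem.Dict.items_foldl_insert_fresh ps Prod.fst Prod.snd PySem.Dict.empty
    (fun _ _ => PySem.Dict.contains_empty _) hps
  show (PySem.Dict.update PySem.Dict.empty ps).items = ps
  simpa using h

-- ===== VERDICT (by name: the statement is the Claim_ definition above) =====
theorem merge_page_refs_spec : Claim_equal_merge_page_refs := by
  intro a b _ hpre
  obtain ⟨hna, hnb⟩ := hpre
  show merge_page_refs a b = merge_page_refs_alt a b
  unfold merge_page_refs merge_page_refs_alt
  have h1 : (a.foldl (fun d kv => d.insert kv.1 (pvNormA kv.2)) PySem.Dict.empty).items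
      = a.map (fun kv => (kv.1, pvNormA kv.2)) := by
    have h := PySem.Dict.items_foldl_insert_fresh a Prod.fst (fun kv => pvNormA kv.2)
      PySem.Dict.empty (fun _ _ => PySem.Dict.contains_empty _) hna
    simpa using h
  have hkeys1 : (a.foldl (fun d kv => d.insert kv.1 (pvNormA kv.2)) PySem.Dict.empty).keys
      = a.map Prod.fst := by
    simp only [PySem.Dict.keys, h1, List.map_map]
    rfl
  rw [bfoldA_items b _ hnb (by rw [hkeys1]; exact hna), h1]
  -- B side: the assembled pair list has distinct keys, so dict() keeps it as is
  have hnewsub : ((b.filter (fun kv => !((PySem.Dict.mk a).contains kv.1))).map Prod.fst).Nodup :=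
    hnb.sublist (List.Sublist.map Prod.fst List.filter_sublist)
  have hnotina : ∀ kv ∈ b.filter (fun kv => !((PySem.Dict.mk a).contains kv.1)),
      kv.1 ∉ a.map Prod.fst := by
    intro kv hkv
    have hp := List.of_mem_filter hkv
    rw [Bool.not_eq_eq_eq_not, Bool.not_true] at hp
    rw [PySem.Dict.contains_eq_decide_mem_keys] at hp
    simpa using hp
  have hnodup : (((a.map (fun kv =>
        (kv.1, pvDedupPos (kv.2 ++ (match (PySem.Dict.mk b).get? kv.1 with
                                    | some v => pvOrEmpty v
                                    | none => [])))))
      ++ ((b.filter (fun kv => !((PySem.Dict.mk a).contains kv.1))).map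
          (fun kv => (kv.1, pvDedupPos (pvOrEmpty kv.2))))).map Prod.fst).Nodup := by
    rw [List.map_append, List.map_map, List.map_map, List.nodup_append]
    refine ⟨by simpa using hna, by simpa using hnewsub, ?_⟩
    intro x hx y hy
    simp only [List.mem_map, Function.comp_apply] at hx hy
    obtain ⟨kv, hkv, rfl⟩ := hx
    obtain ⟨kv', hkv', rfl⟩ := hy
    intro h
    exact hnotina kv' hkv' (h ▸ List.mem_map_of_mem hkv)
  rw [items_ofList_nodup _ hnodup]
  have hcont : ∀ kv : String × List Int,
      (!((a.foldl (fun d kv => d.insert kv.1 (pvNormA kv.2)) PySem.Dict.empty).contains kv.1))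
        = (!((PySem.Dict.mk a).contains kv.1)) := by
    intro kv
    rw [PySem.Dict.contains_eq_decide_mem_keys, PySem.Dict.contains_eq_decide_mem_keys, hkeys1]
    rfl
  rw [List.filter_congr (fun kv _ => hcont kv)]
  congr 1
  · rw [List.map_map]
    apply List.map_congr_left
    intro kv _
    simp only [Function.comp]
    cases hq : (PySem.Dict.mk b).get? kv.1 with
    | none =>
      show (kv.1, pvNormA kv.2) = (kv.1, pvDedupPos (kv.2 ++ []))
      rw [dedupPos_eq_normC, List.append_nil, normA_eq_normC]
    | some v =>
      show (kv.1, pvNormA (pvNormA kv.2 ++ pvOrEmpty v)) = (kv.1, pvDedupPos (kv.2 ++ pvOrEmpty v))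
      rw [dedupPos_eq_normC, normA_eq_normC kv.2, renorm]
  · apply List.map_congr_left
    intro kv _
    rw [dedupPos_eq_normC, normA_eq_normC]
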